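-- pv_equiv track=rewrite | github.com/thiagobrunoms/coding | arrays/find-element-most-frequent.py | find_highest_frequency
-- ===== SOURCE A (Python) =====
-- def find_highest_frequency(elements: list) -> int:
--     frequencies_map = {}
--     highest = -1
--     current_frequency = -1
--     found_element = -1
--
--     for element in elements:
--         if element not in frequencies_map:
--             frequencies_map[element] = 1
--             current_frequency = 1
--         else:
--             frequencies_map[element] += 1
--             current_frequency = frequencies_map[element]
--
--         if current_frequency > highest:
--             highest = current_frequency
--             found_element = element
--
--     return found_element
-- ===== SOURCE B (Python) =====
-- def find_highest_frequency(elements: list) -> int: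
--     if not elements:
--         return -1
--     counts = {}
--     for e in elements:
--         counts[e] = counts.get(e, 0) + 1
--     target = max(counts.values())
--     running = {}
--     for e in elements:
--         running[e] = running.get(e, 0) + 1
--         if running[e] == target:
--             return e
--     return -1
-- ===== Notes on version B (the rewrite author's own statement) =====
-- stated objective: alternative
-- what changed: A tracks the running maximum and winner inside one pass; B first builds the full frequency table, takes its maximum M, then re-scans and returns the first element whose running count reaches M (early return), with an explicit empty-list guard.
import Mathlib
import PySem

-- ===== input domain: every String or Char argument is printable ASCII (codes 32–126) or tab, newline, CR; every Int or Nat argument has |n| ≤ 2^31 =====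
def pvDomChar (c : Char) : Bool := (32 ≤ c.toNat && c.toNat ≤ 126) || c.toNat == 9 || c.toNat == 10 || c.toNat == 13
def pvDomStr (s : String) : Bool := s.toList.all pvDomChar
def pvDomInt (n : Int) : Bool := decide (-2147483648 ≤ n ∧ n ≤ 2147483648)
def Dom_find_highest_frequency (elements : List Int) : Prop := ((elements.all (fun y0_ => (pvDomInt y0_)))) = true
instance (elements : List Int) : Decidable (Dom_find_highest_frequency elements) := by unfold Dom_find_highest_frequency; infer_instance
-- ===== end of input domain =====

-- B replaces A's single running-max pass by: build the full frequency table, take its maximum,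
-- then re-scan returning the first element whose running count reaches it (objective: alternative decomposition).

-- ===== PORT A =====
def find_highest_frequency (elements : List Int) : Int :=
  (elements.foldl
    (fun (s : PySem.Dict Int Int × Int × Int × Int) element =>
      let fm := s.1
      let highest := s.2.1
      let found := s.2.2.2
      let fmcur : PySem.Dict Int Int × Int :=
        if fm.contains element = false then (fm.insert element 1, 1)
        else
          let fm2 := fm.modify element 0 (· + 1)
          (fm2, fm2.getD element 0)
      if fmcur.2 > highest then (fmcur.1, fmcur.2, fmcur.2, element)
      else (fmcur.1, highest, fmcur.2, found))
    (PySem.Dict.empty, -1, -1, -1)).2.2.2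

-- ===== PORT B =====
def fhfAltScan (target : Int) (running : PySem.Dict Int Int) : List Int → Int
  | [] => -1
  | e :: rest =>
      let r := running.insert e (running.getD e 0 + 1)
      if r.getD e 0 = target then e else fhfAltScan target r rest

def find_highest_frequency_alt (elements : List Int) : Int :=
  if elements = [] then -1
  else
    match PySem.List.max?
        (elements.foldl (fun d e => d.insert e (d.getD e 0 + 1))
          (PySem.Dict.empty : PySem.Dict Int Int)).values (fun v => v) with
    | some target => fhfAltScan target PySem.Dict.empty elements
    | none => -1

-- ===== PRECONDITION & SPEC =====
def Spec_find_highest_frequency (elements : List Int) (out : Int) : Prop := out = find_highest_frequency_alt elements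
instance (elements : List Int) (out : Int) : Decidable (Spec_find_highest_frequency elements out) := by unfold Spec_find_highest_frequency; infer_instance

-- ===== CLAIM (what is proved, stated in full; the proofs are below) =====
def Claim_equal_find_highest_frequency : Prop := ∀ (elements : List Int), Dom_find_highest_frequency elements → Spec_find_highest_frequency elements (find_highest_frequency elements)

-- ===== LEMMAS AND PROOFS =====

-- proof-side name for A's loop body
def fhfAStep (s : PySem.Dict Int Int × Int × Int × Int) (element : Int) :
    PySem.Dict Int Int × Int × Int × Int :=
  let fm := s.1
  let highest := s.2.1
  let found := s.2.2.2
  let fmcur : PySem.Dict Int Int × Int :=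
    if fm.contains element = false then (fm.insert element 1, 1)
    else
      let fm2 := fm.modify element 0 (· + 1)
      (fm2, fm2.getD element 0)
  if fmcur.2 > highest then (fmcur.1, fmcur.2, fmcur.2, element)
  else (fmcur.1, highest, fmcur.2, found)

def fhfADictStep (d : PySem.Dict Int Int) (e : Int) : PySem.Dict Int Int :=
  if d.contains e = false then d.insert e 1 else d.modify e 0 (· + 1)

def fhfADict (l : List Int) : PySem.Dict Int Int := l.foldl fhfADictStep PySem.Dict.empty

-- fhfH: the maximum final frequency (-1 on []); fhfC: frequency of the last element;
-- fhfF: first element whose running count reaches fhfH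
def fhfH (l : List Int) : Int :=
  match PySem.List.max? (l.map (fun x => (l.count x : Int))) (fun v => v) with
  | some m => m
  | none => -1

def fhfScanO (pre : List Int) : List Int → Int → Option Int
  | [], _ => none
  | e :: rest, m => if (pre.count e : Int) + 1 = m then some e else fhfScanO (pre ++ [e]) rest m

def fhfC (l : List Int) : Int :=
  match l.getLast? with
  | some e => (l.count e : Int)
  | none => -1

def fhfF (l : List Int) : Int := (fhfScanO [] l (fhfH l)).getD (-1)

lemma fhfADictStep_getD (d : PySem.Dict Int Int) (e v : Int) :
    (fhfADictStep d e).getD v 0 = if v = e then d.getD v 0 + 1 else d.getD v 0 := by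
  unfold fhfADictStep
  by_cases hc : d.contains e = false
  · rw [if_pos hc, PySem.Dict.getD_insert]
    split_ifs with hv
    · subst hv; rw [PySem.Dict.getD_of_not_contains d 0 hc]; omega
    · rfl
  · rw [if_neg hc, PySem.Dict.getD_modify]
    split_ifs with hv
    · subst hv; rfl
    · rfl

lemma fhfADictStep_contains (d : PySem.Dict Int Int) (e v : Int) :
    (fhfADictStep d e).contains v = (v == e || d.contains v) := by
  unfold fhfADictStep
  by_cases hc : d.contains e = false
  · rw [if_pos hc, PySem.Dict.contains_insert]
  · rw [if_neg hc, PySem.Dict.contains_modify]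

lemma fhfADict_getD (l : List Int) : ∀ (d : PySem.Dict Int Int) (v : Int),
    (l.foldl fhfADictStep d).getD v 0 = d.getD v 0 + l.count v := by
  induction l with
  | nil => intro d v; simp
  | cons e t ih =>
      intro d v
      simp only [List.foldl_cons, List.count_cons]
      rw [ih, fhfADictStep_getD]
      by_cases hv : v = e
      · subst hv
        simp only [beq_self_eq_true, if_true]
        push_cast; ring
      · have he : (e == v) = false := by simp [Ne.symm hv]
        simp only [if_neg hv, he, Bool.false_eq_true, if_false]
        push_cast; ring

lemma fhfADict_contains (l : List Int) : ∀ (d : PySem.Dict Int Int) (v : Int),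
    (l.foldl fhfADictStep d).contains v = (d.contains v || decide (v ∈ l)) := by
  induction l with
  | nil => intro d v; simp
  | cons e t ih =>
      intro d v
      simp only [List.foldl_cons]
      rw [ih, fhfADictStep_contains]
      by_cases hv : v = e <;> by_cases hm : v ∈ t <;>
        simp [hv, hm]

lemma fhfH_spec (l : List Int) (h : l ≠ []) :
    (∃ x ∈ l, (l.count x : Int) = fhfH l) ∧ (∀ x ∈ l, (l.count x : Int) ≤ fhfH l) := by
  unfold fhfH
  cases hm : PySem.List.max? (l.map (fun x => (l.count x : Int))) (fun v => v) with
  | none =>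
      rw [PySem.List.max?_eq_none_iff] at hm
      exact absurd (List.map_eq_nil_iff.mp hm) h
  | some m =>
      constructor
      · have := PySem.List.max?_mem hm
        rcases List.mem_map.mp this with ⟨x, hx, hcx⟩
        exact ⟨x, hx, hcx⟩
      · intro x hx
        exact PySem.List.max?_isMax hm _ (List.mem_map_of_mem hx)

lemma fhfH_pos (l : List Int) (h : l ≠ []) : 1 ≤ fhfH l := by
  obtain ⟨x, hx, hcx⟩ := (fhfH_spec l h).1
  have : 0 < l.count x := List.count_pos_iff.mpr hx
  omega

lemma fhfH_append (l : List Int) (e : Int) :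
    fhfH (l ++ [e]) = max (fhfH l) ((l.count e : Int) + 1) := by
  have hne : l ++ [e] ≠ [] := by simp
  obtain ⟨⟨x, hx, hcx⟩, hub⟩ := fhfH_spec (l ++ [e]) hne
  have hcount_e : ((l ++ [e]).count e : Int) = (l.count e : Int) + 1 := by
    simp [List.count_append]
  have hub' : fhfH (l ++ [e]) ≤ max (fhfH l) ((l.count e : Int) + 1) := by
    rw [← hcx]
    by_cases hxe : x = e
    · subst hxe
      rw [hcount_e]
      exact le_max_right _ _
    · have hxl : x ∈ l := by
        rcases List.mem_append.mp hx with h1 | h1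
        · exact h1
        · exact absurd (List.mem_singleton.mp h1) hxe
      have : ((l ++ [e]).count x : Int) = (l.count x : Int) := by
        simp [List.count_append, Ne.symm hxe]
      rw [this]
      exact le_trans ((fhfH_spec l (List.ne_nil_of_mem hxl)).2 x hxl) (le_max_left _ _)
  have hlb2 : (l.count e : Int) + 1 ≤ fhfH (l ++ [e]) := by
    rw [← hcount_e]
    exact hub e (by simp)
  have hlb1 : fhfH l ≤ fhfH (l ++ [e]) := by
    by_cases hl : l = []
    · subst hl
      have h1 : (1 : Int) ≤ fhfH ([] ++ [e]) := fhfH_pos _ (by simp)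
      have h0 : fhfH ([] : List Int) = -1 := rfl
      omega
    · obtain ⟨x₀, hx₀, hc₀⟩ := (fhfH_spec l hl).1
      have hmem : x₀ ∈ l ++ [e] := List.mem_append.mpr (Or.inl hx₀)
      have hle : (l.count x₀ : Int) ≤ ((l ++ [e]).count x₀ : Int) := by
        simp [List.count_append]
      exact le_trans (by omega) (hub x₀ hmem)
  exact le_antisymm hub' (max_le hlb1 hlb2)

lemma fhfScanO_skip (xs : List Int) : ∀ (pre ys : List Int) (m : Int),
    (∀ x ∈ xs, ((pre ++ xs).count x : Int) < m) →
    fhfScanO pre (xs ++ ys) m = fhfScanO (pre ++ xs) ys m := by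
  induction xs with
  | nil => intro pre ys m _; simp
  | cons x t ih =>
      intro pre ys m h
      have hx := h x List.mem_cons_self
      have hge : (pre.count x : Int) + 1 ≤ ((pre ++ x :: t).count x : Int) := by
        simp [List.count_append]
      simp only [List.cons_append, fhfScanO]
      rw [if_neg (by omega)]
      have hassoc : pre ++ [x] ++ t = pre ++ x :: t := by simp
      have := ih (pre ++ [x]) ys m (by
        intro y hy
        rw [hassoc]
        exact h y (List.mem_cons_of_mem _ hy))
      rw [this, hassoc]

lemma fhfScanO_isSome (xs : List Int) : ∀ (pre : List Int) (m x : Int),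
    x ∈ xs → (pre.count x : Int) + 1 ≤ m → m ≤ ((pre ++ xs).count x : Int) →
    (fhfScanO pre xs m).isSome := by
  induction xs with
  | nil => intro pre m x hx; exact absurd hx (List.not_mem_nil)
  | cons y t ih =>
      intro pre m x hx hlo hhi
      simp only [fhfScanO]
      by_cases hcond : (pre.count y : Int) + 1 = m
      · rw [if_pos hcond]; rfl
      · rw [if_neg hcond]
        by_cases hxt : x ∈ t
        · apply ih (pre ++ [y]) m x hxt
          · by_cases hxy : x = y
            · subst hxy
              have : ((pre ++ [x]).count x : Int) = (pre.count x : Int) + 1 := by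
                simp [List.count_append]
              omega
            · have : ((pre ++ [y]).count x : Int) = (pre.count x : Int) := by
                simp [List.count_append, Ne.symm hxy]
              omega
          · have : pre ++ [y] ++ t = pre ++ y :: t := by simp
            rw [this]
            exact hhi
        · have hxy : x = y := by
            rcases List.mem_cons.mp hx with h1 | h1
            · exact h1
            · exact absurd h1 hxt
          subst hxy
          have h0 : t.count x = 0 := List.count_eq_zero.mpr hxt
          have : ((pre ++ x :: t).count x : Int) = (pre.count x : Int) + 1 := by
            simp [List.count_append, h0]
          omega

lemma fhfScanO_some_append (xs : List Int) : ∀ (pre ys : List Int) (m v : Int),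
    fhfScanO pre xs m = some v → fhfScanO pre (xs ++ ys) m = some v := by
  induction xs with
  | nil => intro pre ys m v h; exact absurd h (by simp [fhfScanO])
  | cons x t ih =>
      intro pre ys m v h
      simp only [fhfScanO] at h
      simp only [List.cons_append, fhfScanO]
      by_cases hcond : (pre.count x : Int) + 1 = m
      · rw [if_pos hcond] at h ⊢; exact h
      · rw [if_neg hcond] at h ⊢; exact ih _ _ _ _ h

lemma fhfF_append_new (l : List Int) (e : Int) (h : fhfH l < (l.count e : Int) + 1) :
    fhfF (l ++ [e]) = e := by
  unfold fhfF
  rw [fhfH_append, max_eq_right (le_of_lt h)]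
  have hskip := fhfScanO_skip l [] [e] ((l.count e : Int) + 1) (by
    intro x hx
    simp only [List.nil_append]
    exact lt_of_le_of_lt ((fhfH_spec l (List.ne_nil_of_mem hx)).2 x hx) h)
  simp only [List.nil_append] at hskip
  rw [hskip]
  simp [fhfScanO]

lemma fhfF_append_old (l : List Int) (e : Int) (h : (l.count e : Int) + 1 ≤ fhfH l) :
    fhfF (l ++ [e]) = fhfF l := by
  have hl : l ≠ [] := by
    intro hnil
    subst hnil
    have : fhfH ([] : List Int) = -1 := rfl
    simp at h
    omega
  obtain ⟨x₀, hx₀, hc₀⟩ := (fhfH_spec l hl).1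
  have hsome : (fhfScanO [] l (fhfH l)).isSome :=
    fhfScanO_isSome l [] (fhfH l) x₀ hx₀
      (by simpa using fhfH_pos l hl)
      (by simpa using le_of_eq hc₀.symm)
  obtain ⟨v, hv⟩ := Option.isSome_iff_exists.mp hsome
  unfold fhfF
  rw [fhfH_append, max_eq_left h, fhfScanO_some_append l [] [e] (fhfH l) v hv, hv]

lemma fhfA_inv (l : List Int) :
    l.foldl fhfAStep (PySem.Dict.empty, -1, -1, -1) = (fhfADict l, fhfH l, fhfC l, fhfF l) := by
  induction l using List.reverseRecOn with
  | nil => rfl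
  | append_singleton l e ih =>
      rw [List.foldl_append, ih, List.foldl_cons, List.foldl_nil]
      have hcont : (fhfADict l).contains e = decide (e ∈ l) := by
        unfold fhfADict
        rw [fhfADict_contains]
        simp
      have hgetD : (fhfADict l).getD e 0 = (l.count e : Int) := by
        unfold fhfADict
        rw [fhfADict_getD]
        simp
      have hdict : fhfADict (l ++ [e]) = fhfADictStep (fhfADict l) e := by
        unfold fhfADict
        rw [List.foldl_append, List.foldl_cons, List.foldl_nil]
      have hcur : (if (fhfADict l).contains e = false
            then ((fhfADict l).insert e 1, (1 : Int))
            else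
              let fm2 := (fhfADict l).modify e 0 (· + 1)
              (fm2, fm2.getD e 0))
          = (fhfADictStep (fhfADict l) e, (l.count e : Int) + 1) := by
        unfold fhfADictStep
        by_cases hmem : e ∈ l
        · have hc : (fhfADict l).contains e = true := by rw [hcont]; simp [hmem]
          rw [if_neg (by rw [hc]; simp), if_neg (by rw [hc]; simp)]
          simp only [Prod.mk.injEq]
          refine ⟨trivial, ?_⟩
          rw [PySem.Dict.getD_modify]
          rw [if_pos rfl, hgetD]
        · have hc : (fhfADict l).contains e = false := by rw [hcont]; simp [hmem]
          rw [if_pos hc, if_pos hc]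
          have : l.count e = 0 := List.count_eq_zero.mpr hmem
          simp [this]
      have hCnew : fhfC (l ++ [e]) = (l.count e : Int) + 1 := by
        unfold fhfC
        rw [List.getLast?_concat]
        simp [List.count_append]
      show fhfAStep (fhfADict l, fhfH l, fhfC l, fhfF l) e = _
      unfold fhfAStep
      simp only []
      rw [hcur]
      by_cases hgt : (l.count e : Int) + 1 > fhfH l
      · rw [if_pos hgt]
        rw [hdict, fhfH_append, max_eq_right (le_of_lt hgt), hCnew,
          fhfF_append_new l e hgt]
      · rw [if_neg hgt]
        rw [hdict, fhfH_append, max_eq_left (by omega), hCnew,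
          fhfF_append_old l e (by omega)]

lemma fhfAltScan_eq (xs : List Int) : ∀ (pre : List Int) (running : PySem.Dict Int Int) (m : Int),
    (∀ v, running.getD v 0 = (pre.count v : Int)) →
    fhfAltScan m running xs = (fhfScanO pre xs m).getD (-1) := by
  induction xs with
  | nil => intro pre running m _; rfl
  | cons e t ih =>
      intro pre running m h
      simp only [fhfAltScan, fhfScanO]
      have hr : (running.insert e (running.getD e 0 + 1)).getD e 0 = (pre.count e : Int) + 1 := by
        rw [PySem.Dict.getD_insert_self, h]
      rw [hr]
      by_cases hcond : (pre.count e : Int) + 1 = m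
      · rw [if_pos hcond, if_pos hcond]; rfl
      · rw [if_neg hcond, if_neg hcond]
        apply ih
        intro v
        rw [PySem.Dict.getD_insert]
        by_cases hv : v = e
        · subst hv; rw [if_pos rfl, h]; simp [List.count_append]
        · rw [if_neg hv, h]; simp [List.count_append, Ne.symm hv]

lemma fhf_max?_congr (xs ys : List Int) (h : ∀ v, v ∈ xs ↔ v ∈ ys) :
    PySem.List.max? xs (fun v => v) = PySem.List.max? ys (fun v => v) := by
  cases hx : PySem.List.max? xs (fun v => v) with
  | none =>
      rw [PySem.List.max?_eq_none_iff] at hx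
      subst hx
      cases hy : PySem.List.max? ys (fun v => v) with
      | none => rfl
      | some m =>
          have := PySem.List.max?_mem hy
          exact absurd ((h m).mpr this) (List.not_mem_nil)
  | some m1 =>
      cases hy : PySem.List.max? ys (fun v => v) with
      | none =>
          rw [PySem.List.max?_eq_none_iff] at hy
          subst hy
          have := PySem.List.max?_mem hx
          exact absurd ((h m1).mp this) (List.not_mem_nil)
      | some m2 =>
          have h1 : m1 ≤ m2 := PySem.List.max?_isMax hy m1 ((h m1).mp (PySem.List.max?_mem hx))
          have h2 : m2 ≤ m1 := PySem.List.max?_isMax hx m2 ((h m2).mpr (PySem.List.max?_mem hy))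
          rw [le_antisymm h1 h2]

lemma fhf_alt_eq (l : List Int) : find_highest_frequency_alt l = fhfF l := by
  by_cases hl : l = []
  · subst hl; rfl
  · unfold find_highest_frequency_alt
    rw [if_neg hl]
    have hnd : (l.foldl (fun d e => d.insert e (d.getD e 0 + 1))
        (PySem.Dict.empty : PySem.Dict Int Int)).keys.Nodup :=
      PySem.Dict.nodup_keys_foldl_insert l _ _ (by simp)
    have hkeys : (l.foldl (fun d e => d.insert e (d.getD e 0 + 1))
        (PySem.Dict.empty : PySem.Dict Int Int)).keys = PySem.Set.ofList l := by
      rw [PySem.Dict.keys_foldl_insert]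
      rfl
    have hvalmem : ∀ v, v ∈ (l.foldl (fun d e => d.insert e (d.getD e 0 + 1))
          (PySem.Dict.empty : PySem.Dict Int Int)).values
        ↔ v ∈ l.map (fun x => (l.count x : Int)) := by
      intro v
      rw [PySem.Dict.values_eq_map_keys _ hnd 0, hkeys]
      simp only [List.mem_map, PySem.Set.mem_ofList]
      constructor
      · rintro ⟨k, hk, hv⟩
        refine ⟨k, hk, ?_⟩
        rw [← hv, PySem.Dict.getD_foldl_insert_add_one]
        simp
      · rintro ⟨k, hk, hv⟩
        refine ⟨k, hk, ?_⟩
        rw [PySem.Dict.getD_foldl_insert_add_one]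
        simp [← hv]
    have hmax := fhf_max?_congr _ _ hvalmem
    cases hm : PySem.List.max? (l.map (fun x => (l.count x : Int))) (fun v => v) with
    | none =>
        rw [PySem.List.max?_eq_none_iff] at hm
        exact absurd (List.map_eq_nil_iff.mp hm) hl
    | some m =>
        rw [hmax, hm]
        have hHm : fhfH l = m := by unfold fhfH; rw [hm]
        show fhfAltScan m PySem.Dict.empty l = fhfF l
        rw [← hHm, fhfAltScan_eq l [] PySem.Dict.empty (fhfH l) (by intro v; simp)]
        rfl

-- ===== VERDICT (by name: the statement is the Claim_ definition above) =====
theorem find_highest_frequency_spec : Claim_equal_find_highest_frequency := by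
  intro elements _
  unfold Spec_find_highest_frequency
  rw [fhf_alt_eq]
  show (elements.foldl fhfAStep (PySem.Dict.empty, -1, -1, -1)).2.2.2 = fhfF elements
  rw [fhfA_inv]
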